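-- pv_equiv track=rewrite | github.com/miliar/Code_Jam_Webscraper | solutions_python/solutions_year12_round0_nr2/1206.py | checkSurpriseP
-- ===== SOURCE A (Python) =====
-- def checkSurpriseP(score, p):
-- 		for a in range(10, -1, -1):
-- 			for b in range(a, a-3, -1):
-- 				if (b < 0):
-- 					continue
-- 				for c in range(b, a-3, -1):
-- 					if (c < 0):
-- 						continue
-- 					if (a+b+c == score and a >= p):
-- 						return True
-- 					elif (a+b+c < score):
-- 						return False
-- ===== SOURCE B (Python) =====
-- def checkSurpriseP(score, p):
-- 		# One pass over the candidate max value a (descending); the sums reachable with max a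
-- 		# form the interval [a + 2*max(a-2,0), 3*a].
-- 		for a in range(10, -1, -1):
-- 			lo = a + 2 * max(a - 2, 0)
-- 			if lo <= score <= 3 * a and a >= p:
-- 				return True
-- 			if 3 * a < score:
-- 				return False
-- ===== Notes on version B (the rewrite author's own statement) =====
-- stated objective: simpler
-- what changed: Replaces the triple-nested enumeration of all (a,b,c) triples with a single loop over the maximum value a, using the closed-form interval [a+2*max(a-2,0), 3a] of sums reachable with maximum a.
import Mathlib
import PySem

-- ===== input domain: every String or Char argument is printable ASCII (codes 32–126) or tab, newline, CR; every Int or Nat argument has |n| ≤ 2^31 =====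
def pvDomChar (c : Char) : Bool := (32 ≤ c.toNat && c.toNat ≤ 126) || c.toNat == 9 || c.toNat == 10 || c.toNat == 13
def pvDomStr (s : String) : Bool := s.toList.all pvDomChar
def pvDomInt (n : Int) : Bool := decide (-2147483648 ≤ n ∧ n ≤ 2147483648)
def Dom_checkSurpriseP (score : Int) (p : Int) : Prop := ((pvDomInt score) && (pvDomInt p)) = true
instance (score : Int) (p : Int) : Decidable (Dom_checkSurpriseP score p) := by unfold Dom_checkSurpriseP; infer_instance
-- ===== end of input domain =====

-- B replaces the triple nested loop over (a,b,c) by a single descending loop over the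
-- maximum value a with the closed-form reachable-sum interval [a+2*max(a-2,0), 3a] (simpler).

-- ===== PORT A =====
-- innermost 'for c in range(b, a-3, -1)' loop; 'some r' = the function returned r
def pvLoopC (score p a b : Int) : List Int → Option Bool
  | [] => none
  | c :: rest =>
    if c < 0 then pvLoopC score p a b rest
    else if a + b + c = score ∧ a ≥ p then some true
    else if a + b + c < score then some false
    else pvLoopC score p a b rest

-- middle 'for b in range(a, a-3, -1)' loop
def pvLoopB (score p a : Int) : List Int → Option Bool
  | [] => none
  | b :: rest =>
    if b < 0 then pvLoopB score p a rest
    else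
      match pvLoopC score p a b (PySem.List.pyRange b (a - 3) (-1)) with
      | some r => some r
      | none => pvLoopB score p a rest

-- outer 'for a in range(10, -1, -1)' loop
def pvLoopA (score p : Int) : List Int → Option Bool
  | [] => none
  | a :: rest =>
    match pvLoopB score p a (PySem.List.pyRange a (a - 3) (-1)) with
    | some r => some r
    | none => pvLoopA score p rest

def checkSurpriseP (score : Int) (p : Int) : Option Bool :=
  pvLoopA score p (PySem.List.pyRange 10 (-1) (-1))

-- ===== PORT B =====
def pvAltLoop (score p : Int) : List Int → Option Bool
  | [] => none
  | a :: rest =>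
    if a + 2 * max (a - 2) 0 ≤ score ∧ score ≤ 3 * a ∧ a ≥ p then some true
    else if 3 * a < score then some false
    else pvAltLoop score p rest

def checkSurpriseP_alt (score : Int) (p : Int) : Option Bool :=
  pvAltLoop score p (PySem.List.pyRange 10 (-1) (-1))

-- ===== PRECONDITION & SPEC =====
def Spec_checkSurpriseP (score : Int) (p : Int) (out : Option Bool) : Prop := out = checkSurpriseP_alt score p
instance (score : Int) (p : Int) (out : Option Bool) : Decidable (Spec_checkSurpriseP score p out) := by unfold Spec_checkSurpriseP; infer_instance

-- ===== CLAIM (what is proved, stated in full; the proofs are below) =====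
def Claim_equal_checkSurpriseP : Prop := ∀ (score : Int) (p : Int), Dom_checkSurpriseP score p → Spec_checkSurpriseP score p (checkSurpriseP score p)

-- ===== LEMMAS AND PROOFS =====

-- Both programs only compare score against values in [0,30] and p against values in [0,10],
-- so they are invariant under clamping (s,p) to ([-1,31],[0,11]); the clamped grid is finite
-- and settled by 'decide'.

-- hypothesis packages: the two scores (resp. p's) are indistinguishable by the comparisons the loops make
def pvSEquiv (s s' : Int) : Prop :=
  ∀ x : Int, 0 ≤ x → x ≤ 30 → ((x = s ↔ x = s') ∧ (x < s ↔ x < s') ∧ (x ≤ s ↔ x ≤ s') ∧ (s ≤ x ↔ s' ≤ x))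
def pvPEquiv (p p' : Int) : Prop :=
  ∀ a : Int, 0 ≤ a → a ≤ 10 → (a ≥ p ↔ a ≥ p')

lemma pvLoopC_congr (s s' p p' a b : Int) (hs : pvSEquiv s s') (hp : pvPEquiv p p')
    (ha0 : 0 ≤ a) (ha1 : a ≤ 10) (hb : b ≤ a) (l : List Int) (hl : ∀ c ∈ l, c ≤ b) :
    pvLoopC s p a b l = pvLoopC s' p' a b l := by
  induction l with
  | nil => rfl
  | cons c rest ih =>
    have hc : c ≤ b := hl c (by simp)
    have ih' := ih (fun c hc => hl c (by simp [hc]))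
    by_cases h0 : c < 0
    · simp [pvLoopC, h0, ih']
    · have hsum0 : 0 ≤ a + b + c := by omega
      have hsum1 : a + b + c ≤ 30 := by omega
      obtain ⟨he, hlt, -, -⟩ := hs (a + b + c) hsum0 hsum1
      have hpe := hp a ha0 ha1
      by_cases h1 : a + b + c = s ∧ a ≥ p
      · have h1' : a + b + c = s' ∧ a ≥ p' := ⟨he.mp h1.1, hpe.mp h1.2⟩
        simp only [pvLoopC, if_neg h0, if_pos h1, if_pos h1']
      · have h1' : ¬ (a + b + c = s' ∧ a ≥ p') := fun h => h1 ⟨he.mpr h.1, hpe.mpr h.2⟩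
        by_cases h2 : a + b + c < s
        · simp only [pvLoopC, if_neg h0, if_neg h1, if_neg h1', if_pos h2, if_pos (hlt.mp h2)]
        · simp only [pvLoopC, if_neg h0, if_neg h1, if_neg h1', if_neg h2,
            if_neg (fun h => h2 (hlt.mpr h)), ih']

lemma pvLoopB_congr (s s' p p' a : Int) (hs : pvSEquiv s s') (hp : pvPEquiv p p')
    (ha0 : 0 ≤ a) (ha1 : a ≤ 10) (l : List Int) (hl : ∀ b ∈ l, b ≤ a) :
    pvLoopB s p a l = pvLoopB s' p' a l := by
  induction l with
  | nil => rfl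
  | cons b rest ih =>
    have hb : b ≤ a := hl b (by simp)
    have ih' := ih (fun b hb => hl b (by simp [hb]))
    by_cases h0 : b < 0
    · simp [pvLoopB, h0, ih']
    · have hc : pvLoopC s p a b (PySem.List.pyRange b (a - 3) (-1))
          = pvLoopC s' p' a b (PySem.List.pyRange b (a - 3) (-1)) := by
        refine pvLoopC_congr s s' p p' a b hs hp ha0 ha1 hb _ ?_
        intro c hc
        exact ((PySem.List.mem_pyRange_neg_one).mp hc).2
      simp only [pvLoopB, if_neg h0, hc, ih']

lemma pvLoopA_congr (s s' p p' : Int) (hs : pvSEquiv s s') (hp : pvPEquiv p p')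
    (l : List Int) (hl : ∀ a ∈ l, 0 ≤ a ∧ a ≤ 10) :
    pvLoopA s p l = pvLoopA s' p' l := by
  induction l with
  | nil => rfl
  | cons a rest ih =>
    obtain ⟨ha0, ha1⟩ := hl a (by simp)
    have ih' := ih (fun a ha => hl a (by simp [ha]))
    have hb : pvLoopB s p a (PySem.List.pyRange a (a - 3) (-1))
        = pvLoopB s' p' a (PySem.List.pyRange a (a - 3) (-1)) := by
      refine pvLoopB_congr s s' p p' a hs hp ha0 ha1 _ ?_
      intro b hb
      exact ((PySem.List.mem_pyRange_neg_one).mp hb).2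
    simp only [pvLoopA, hb, ih']

lemma pvAltLoop_congr (s s' p p' : Int) (hs : pvSEquiv s s') (hp : pvPEquiv p p')
    (l : List Int) (hl : ∀ a ∈ l, 0 ≤ a ∧ a ≤ 10) :
    pvAltLoop s p l = pvAltLoop s' p' l := by
  induction l with
  | nil => rfl
  | cons a rest ih =>
    obtain ⟨ha0, ha1⟩ := hl a (by simp)
    have ih' := ih (fun a ha => hl a (by simp [ha]))
    have hlo0 : 0 ≤ a + 2 * max (a - 2) 0 := by omega
    have hlo1 : a + 2 * max (a - 2) 0 ≤ 30 := by omega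
    have h3a0 : 0 ≤ 3 * a := by omega
    have h3a1 : 3 * a ≤ 30 := by omega
    obtain ⟨-, -, hle, -⟩ := hs (a + 2 * max (a - 2) 0) hlo0 hlo1
    obtain ⟨-, hlt3, -, hge3⟩ := hs (3 * a) h3a0 h3a1
    have hpe := hp a ha0 ha1
    by_cases h1 : a + 2 * max (a - 2) 0 ≤ s ∧ s ≤ 3 * a ∧ a ≥ p
    · have h1' : a + 2 * max (a - 2) 0 ≤ s' ∧ s' ≤ 3 * a ∧ a ≥ p' :=
        ⟨hle.mp h1.1, hge3.mp h1.2.1, hpe.mp h1.2.2⟩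
      simp only [pvAltLoop, if_pos h1, if_pos h1']
    · have h1' : ¬ (a + 2 * max (a - 2) 0 ≤ s' ∧ s' ≤ 3 * a ∧ a ≥ p') :=
        fun h => h1 ⟨hle.mpr h.1, hge3.mpr h.2.1, hpe.mpr h.2.2⟩
      by_cases h2 : 3 * a < s
      · simp only [pvAltLoop, if_neg h1, if_neg h1', if_pos h2, if_pos (hlt3.mp h2)]
      · simp only [pvAltLoop, if_neg h1, if_neg h1', if_neg h2,
          if_neg (fun h => h2 (hlt3.mpr h)), ih']

lemma pvOuterMem : ∀ a ∈ PySem.List.pyRange 10 (-1) (-1), 0 ≤ a ∧ a ≤ 10 := by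
  intro a ha
  have := (PySem.List.mem_pyRange_neg_one).mp ha
  omega

-- the clamped finite grid: s ∈ [-1,31] (as i-1, i : Fin 33), p ∈ [0,11]
lemma pvFinCheck : ∀ i : Fin 33, ∀ j : Fin 12,
    checkSurpriseP ((i : Int) - 1) (j : Int) = checkSurpriseP_alt ((i : Int) - 1) (j : Int) := by
  decide

theorem checkSurpriseP_spec_aux (s p : Int) : checkSurpriseP s p = checkSurpriseP_alt s p := by
  obtain ⟨sc, hsc⟩ : ∃ sc : Int, sc = max (-1) (min 31 s) := ⟨_, rfl⟩
  obtain ⟨pc, hpc⟩ : ∃ pc : Int, pc = max 0 (min 11 p) := ⟨_, rfl⟩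
  have hs : pvSEquiv s sc := by intro x h0 h1; omega
  have hp : pvPEquiv p pc := by intro a h0 h1; omega
  have hA : checkSurpriseP s p = checkSurpriseP sc pc :=
    pvLoopA_congr s sc p pc hs hp _ pvOuterMem
  have hB : checkSurpriseP_alt s p = checkSurpriseP_alt sc pc :=
    pvAltLoop_congr s sc p pc hs hp _ pvOuterMem
  have hi : (sc + 1).toNat < 33 := by omega
  have hj : pc.toNat < 12 := by omega
  have hfin := pvFinCheck ⟨(sc + 1).toNat, hi⟩ ⟨pc.toNat, hj⟩
  have hsv : ((((sc + 1).toNat : Nat) : Int)) - 1 = sc := by omega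
  have hpv : ((pc.toNat : Nat) : Int) = pc := by omega
  simp only [hsv, hpv] at hfin
  rw [hA, hB, hfin]

-- ===== VERDICT (by name: the statement is the Claim_ definition above) =====
theorem checkSurpriseP_spec : Claim_equal_checkSurpriseP := by
  intro s p _
  exact checkSurpriseP_spec_aux s p
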